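-- pv_equiv track=rewrite | github.com/itsvinayak/algorithm | stack/NearestGreaterToRight.py | NGRStack
-- ===== SOURCE A (Python) =====
-- class Stack:
--     def __init__(self):
--         self.stack = []
--
--     def isEmpty(self):
--         return len(self.stack) == 0
--
--     def push(self, element):
--         self.stack.append(element)
--
--     def pop(self):
--         if self.isEmpty():
--             return -1
--         else:
--             return self.stack.pop()
--
--     def top(self):
--         return self.stack[-1]
--
-- def NGRStack(arr):
--     s = Stack()
--     ans = []
--     for i in range(len(arr) - 1, -1, -1):
--         if s.isEmpty():
--             ans.append(-1)
--         else:
--             if s.top() > arr[i]: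
--                 ans.append(s.top())
--             else:
--                 while not s.isEmpty() and s.top() <= arr[i]:
--                     s.pop()
--                 if s.isEmpty():
--                     ans.append(-1)
--                 else:
--                     ans.append(s.top())
--         s.push(arr[i])
--     ans.reverse()
--     return ans
-- ===== SOURCE B (Python) =====
-- def NGRStack(arr):
--     n = len(arr)
--     res = []
--     for i in range(n):
--         nxt = -1
--         for j in range(i + 1, n):
--             if arr[j] > arr[i]:
--                 nxt = arr[j]
--                 break
--         res.append(nxt)
--     return res
-- ===== Notes on version B (the rewrite author's own statement) =====
-- stated objective: simpler
-- what changed: Replaces the reversed monotonic-stack pass with a direct per-element forward scan that returns the first strictly greater element to the right.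
import Mathlib
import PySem

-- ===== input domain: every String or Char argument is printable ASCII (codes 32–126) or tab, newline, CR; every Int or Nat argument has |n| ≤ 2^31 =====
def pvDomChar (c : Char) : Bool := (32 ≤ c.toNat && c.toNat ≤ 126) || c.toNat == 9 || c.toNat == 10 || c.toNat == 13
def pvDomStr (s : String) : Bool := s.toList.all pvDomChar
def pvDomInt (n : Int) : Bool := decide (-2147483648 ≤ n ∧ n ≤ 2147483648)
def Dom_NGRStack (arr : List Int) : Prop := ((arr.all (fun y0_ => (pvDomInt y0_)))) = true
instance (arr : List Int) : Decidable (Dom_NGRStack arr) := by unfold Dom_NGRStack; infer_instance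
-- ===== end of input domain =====

-- B replaces A's reversed monotonic-stack pass with a direct per-element forward scan (simpler, not faster).


-- ===== PORT A =====
-- the inner 'while not s.isEmpty() and s.top() <= arr[i]: s.pop()' loop (stack held top-first)
def popWhileLE (x : Int) : List Int → List Int
  | [] => []
  | t :: rest => if t ≤ x then popWhileLE x rest else t :: rest

-- one iteration of A's for-loop body: decide what to append to ans, then push arr[i]
def ngrStep (st : List Int × List Int) (x : Int) : List Int × List Int :=
  match st with
  | (s, ans) =>
    match s with
    | [] => (x :: s, ans ++ [-1])
    | t :: _ =>
      if t > x then (x :: s, ans ++ [t])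
      else
        match popWhileLE x s with
        | [] => (x :: [], ans ++ [-1])
        | t' :: rest => (x :: t' :: rest, ans ++ [t'])

-- 'for i in range(len(arr)-1, -1, -1)' visits arr reversed; then 'ans.reverse()'
def NGRStack (arr : List Int) : List Int :=
  ((arr.reverse.foldl ngrStep ([], [])).2).reverse

-- ===== PORT B =====
-- the inner 'for j in range(i+1, n)' scan with break
def firstGreater (v : Int) : List Int → Int
  | [] => -1
  | x :: xs => if x > v then x else firstGreater v xs

def NGRStack_alt : List Int → List Int
  | [] => []
  | x :: xs => firstGreater x xs :: NGRStack_alt xs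

-- ===== PRECONDITION & SPEC =====
def Spec_NGRStack (arr : List Int) (out : List Int) : Prop := out = NGRStack_alt arr
instance (arr : List Int) (out : List Int) : Decidable (Spec_NGRStack arr out) := by unfold Spec_NGRStack; infer_instance

-- ===== CLAIM (what is proved, stated in full; the proofs are below) =====
def Claim_equal_NGRStack : Prop := ∀ (arr : List Int), Dom_NGRStack arr → Spec_NGRStack arr (NGRStack arr)

-- ===== LEMMAS AND PROOFS =====

-- the value A appends given stack s and current element x
def ansOf (s : List Int) (x : Int) : Int :=
  match popWhileLE x s with
  | [] => -1
  | t :: _ => t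

-- the stack after processing the whole list arr right-to-left, starting from s
def stk (s : List Int) : List Int → List Int
  | [] => s
  | x :: xs => x :: popWhileLE x (stk s xs)

-- the answers, leftmost element first
def ansL (s : List Int) : List Int → List Int
  | [] => []
  | x :: xs => ansOf (stk s xs) x :: ansL s xs

theorem ngrStep_eq (s ans : List Int) (x : Int) :
    ngrStep (s, ans) x = (x :: popWhileLE x s, ans ++ [ansOf s x]) := by
  cases s with
  | nil => simp [ngrStep, popWhileLE, ansOf]
  | cons t rest =>
    by_cases h : t > x
    · have hle : ¬ t ≤ x := by omega
      simp [ngrStep, h, popWhileLE, hle, ansOf]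
    · have hle : t ≤ x := by omega
      simp only [ngrStep, if_neg h, ansOf]
      cases popWhileLE x (t :: rest) <;> simp

theorem foldl_reverse_ngr (arr : List Int) : ∀ (s ans : List Int),
    arr.reverse.foldl ngrStep (s, ans) = (stk s arr, ans ++ (ansL s arr).reverse) := by
  induction arr with
  | nil => intro s ans; simp [stk, ansL]
  | cons x xs ih =>
    intro s ans
    simp only [List.reverse_cons, List.foldl_append, ih, List.foldl_cons, List.foldl_nil]
    rw [ngrStep_eq]
    simp [stk, ansL, List.append_assoc]

theorem popWhileLE_popWhileLE (x v : Int) (h : x ≤ v) :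
    ∀ l : List Int, popWhileLE v (popWhileLE x l) = popWhileLE v l := by
  intro l
  induction l with
  | nil => simp [popWhileLE]
  | cons t rest ih =>
    by_cases ht : t ≤ x
    · have : t ≤ v := le_trans ht h
      simp [popWhileLE, ht, this, ih]
    · simp [popWhileLE, ht]

-- firstGreater with an explicit fallback continuation
def firstGreaterCont (v : Int) (l : List Int) (k : Int) : Int :=
  match l with
  | [] => k
  | x :: xs => if x > v then x else firstGreaterCont v xs k

-- the stack answers exactly like a forward scan of the already-processed suffix, falling back to the old stack
theorem ansOf_stk_eq (arr : List Int) : ∀ (s : List Int) (v : Int),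
    ansOf (stk s arr) v = firstGreaterCont v arr (ansOf s v) := by
  induction arr with
  | nil => intro s v; simp [stk, firstGreaterCont]
  | cons x xs ih =>
    intro s v
    by_cases h : x > v
    · have hle : ¬ x ≤ v := by omega
      simp [stk, ansOf, popWhileLE, hle, firstGreaterCont, h]
    · have hle : x ≤ v := by omega
      simp only [stk, ansOf, popWhileLE, if_pos hle, popWhileLE_popWhileLE x v hle,
        firstGreaterCont, if_neg h]
      exact ih s v

theorem firstGreaterCont_neg1 (v : Int) : ∀ l : List Int,
    firstGreaterCont v l (-1) = firstGreater v l := by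
  intro l
  induction l with
  | nil => rfl
  | cons x xs ih => by_cases h : x > v <;> simp [firstGreaterCont, firstGreater, h, ih]

theorem ansL_nil_eq (arr : List Int) : ansL [] arr = NGRStack_alt arr := by
  induction arr with
  | nil => rfl
  | cons x xs ih =>
    have h : ansOf (stk [] xs) x = firstGreater x xs := by
      rw [ansOf_stk_eq]
      simpa [ansOf, popWhileLE] using firstGreaterCont_neg1 x xs
    simp [ansL, NGRStack_alt, ih, h]

-- ===== VERDICT (by name: the statement is the Claim_ definition above) =====
theorem NGRStack_spec : Claim_equal_NGRStack := by
  intro arr _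
  unfold Spec_NGRStack NGRStack
  rw [foldl_reverse_ngr]
  simp [ansL_nil_eq]
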